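-- pv_equiv track=rewrite | github.com/ljrkkaa/VLTL-Bench | test_lora_model.py | _postprocess_ltl_output
-- ===== SOURCE A (Python) =====
-- def _postprocess_ltl_output(text: str) -> str:
--     s = (text or "").strip()
--     if not s:
--         return s
--
--     # Some models may generate multiple candidates separated by blank lines.
--     blocks = [b.strip() for b in s.split("\n\n") if b.strip()]
--     s = blocks[0] if blocks else s
--
--     # If still multiline, keep the first non-empty line.
--     lines = [ln.strip() for ln in s.splitlines() if ln.strip()]
--     return lines[0] if lines else s
-- ===== SOURCE B (Python) =====
-- def _postprocess_ltl_output(text: str) -> str: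
--     s = (text or "").strip()
--     if not s:
--         return s
--     for ln in s.splitlines():
--         ln = ln.strip()
--         if ln:
--             return ln
--     return s
-- ===== Notes on version B (the rewrite author's own statement) =====
-- stated objective: simpler
-- what changed: Drops the redundant blank-line block-split stage entirely: B strips the input and returns the first non-empty stripped line in a single pass over splitlines(), instead of A's two sequential comprehension passes (split on '\n\n' into stripped blocks, then splitlines of the first block).
import Mathlib
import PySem

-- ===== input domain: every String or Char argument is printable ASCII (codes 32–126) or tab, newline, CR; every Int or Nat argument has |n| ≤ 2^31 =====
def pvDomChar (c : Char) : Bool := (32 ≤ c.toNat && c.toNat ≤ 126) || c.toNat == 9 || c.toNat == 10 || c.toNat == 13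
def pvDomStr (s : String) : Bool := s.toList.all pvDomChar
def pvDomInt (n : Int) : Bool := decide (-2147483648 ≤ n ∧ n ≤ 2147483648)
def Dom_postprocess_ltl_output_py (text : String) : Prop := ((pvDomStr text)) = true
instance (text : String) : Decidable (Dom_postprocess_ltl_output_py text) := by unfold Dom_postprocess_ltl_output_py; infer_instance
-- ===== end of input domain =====

-- B drops A's redundant blank-line block-split stage: it strips the input and returns the first
-- non-empty stripped line of splitlines() in one pass (objective: simpler).

-- ===== PORT A =====
-- literal transliteration of A on the char-list level: strip; split on "\n\n"; keep stripped
-- non-empty blocks; first block (else s); splitlines; keep stripped non-empty lines; first (else s)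
def postprocess_ltl_output_py (text : String) : String :=
  let s := PySem.Chars.strip text.toList
  if s.isEmpty then String.ofList s
  else
    let blocks := ((PySem.Chars.splitOn s ['\n', '\n']).map (fun b => PySem.Chars.strip b)).filter (fun b => !b.isEmpty)
    let s2 := match blocks with | [] => s | b :: _ => b
    let lines := ((PySem.Chars.splitlines s2).map (fun ln => PySem.Chars.strip ln)).filter (fun ln => !ln.isEmpty)
    match lines with | [] => String.ofList s2 | l :: _ => String.ofList l

-- ===== PORT B =====
-- the 'for ln in s.splitlines(): …' loop of Source B
def pvAltLoop (lns : List (List Char)) (s : List Char) : List Char :=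
  match lns with
  | [] => s
  | ln :: rest => let l := PySem.Chars.strip ln; if l.isEmpty then pvAltLoop rest s else l

def postprocess_ltl_output_py_alt (text : String) : String :=
  let s := PySem.Chars.strip text.toList
  if s.isEmpty then String.ofList s
  else String.ofList (pvAltLoop (PySem.Chars.splitlines s) s)

-- ===== PRECONDITION & SPEC =====
def Spec_postprocess_ltl_output_py (text : String) (out : String) : Prop := out = postprocess_ltl_output_py_alt text
instance (text : String) (out : String) : Decidable (Spec_postprocess_ltl_output_py text out) := by unfold Spec_postprocess_ltl_output_py; infer_instance

-- ===== CLAIM (what is proved, stated in full; the proofs are below) =====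
def Claim_equal_postprocess_ltl_output_py : Prop := ∀ (text : String), Dom_postprocess_ltl_output_py text → Spec_postprocess_ltl_output_py text (postprocess_ltl_output_py text)

-- ===== LEMMAS AND PROOFS =====

def pvBr (c : Char) : Bool :=
  decide (c.toNat = 10) || decide (c.toNat = 13) || decide (c.toNat = 11) || decide (c.toNat = 12) ||
  decide (c.toNat = 28) || decide (c.toNat = 29) || decide (c.toNat = 30) || decide (c.toNat = 133) ||
  decide (c.toNat = 8232) || decide (c.toNat = 8233)
theorem go_nil (isB) (cur : List Char) (acc) :
    PySem.Chars.splitlines.go isB [] cur acc =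
      if cur.isEmpty then acc.reverse else (cur.reverse :: acc).reverse := by
  rw [PySem.Chars.splitlines.go.eq_def]
theorem go_crlf (isB) (rest cur acc) :
    PySem.Chars.splitlines.go isB ('\r'::'\n'::rest) cur acc =
      PySem.Chars.splitlines.go isB rest [] (cur.reverse :: acc) := by
  rw [PySem.Chars.splitlines.go.eq_def]; rfl
theorem go_cons (isB) (c) (rest cur acc) (h : ∀ w, c :: rest ≠ '\r'::'\n'::w) :
    PySem.Chars.splitlines.go isB (c::rest) cur acc =
      (if isB c then PySem.Chars.splitlines.go isB rest [] (cur.reverse :: acc)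
       else PySem.Chars.splitlines.go isB rest (c :: cur) acc) := by
  rw [PySem.Chars.splitlines.go.eq_def]
  split
  · simp_all
  · rename_i heq; exact absurd heq (h _)
  · rename_i heq; injection heq with e1 e2; subst e1; subst e2; rfl

theorem pvNe_of_ne_cr {c : Char} (rest : List Char) (hc : c ≠ '\r') :
    ∀ w, c :: rest ≠ '\r'::'\n'::w := by
  intro w hw; injection hw with e1 _; exact hc e1

theorem pvNe_of_ne_nl {c c2 : Char} (w : List Char) (h2 : c2 ≠ '\n') :
    ∀ w', c :: c2 :: w ≠ '\r'::'\n'::w' := by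
  intro w' hw; injection hw with _ e2; injection e2 with e3 _; exact h2 e3

theorem pvNe_singleton (c : Char) : ∀ w, [c] ≠ '\r'::'\n'::w := by
  intro w hw; injection hw with _ e2; exact absurd e2 (by simp)

theorem go_acc : ∀ (n : Nat) (u cur : List Char) (acc), u.length ≤ n →
    PySem.Chars.splitlines.go pvBr u cur acc =
      acc.reverse ++ PySem.Chars.splitlines.go pvBr u cur [] := by
  intro n
  induction n with
  | zero =>
    intro u cur acc hu
    have : u = [] := List.eq_nil_of_length_eq_zero (Nat.le_zero.mp hu)
    subst this
    rw [go_nil, go_nil]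
    split <;> simp
  | succ n ih =>
    intro u cur acc hu
    have step : (∀ w, u ≠ '\r'::'\n'::w) → ∀ (c : Char) (rest : List Char), u = c :: rest →
        PySem.Chars.splitlines.go pvBr u cur acc =
          acc.reverse ++ PySem.Chars.splitlines.go pvBr u cur [] := by
      intro hne c rest hco
      subst hco
      rw [go_cons _ _ _ _ _ hne, go_cons _ _ _ _ _ hne]
      simp only [List.length_cons] at hu
      by_cases hb : pvBr c
      · rw [hb]
        rw [ih rest [] (cur.reverse :: acc) (by omega), ih rest [] [cur.reverse] (by omega)]
        simp
      · rw [Bool.not_eq_true] at hb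
        rw [hb]
        exact ih rest (c::cur) acc (by omega)
    cases u with
    | nil => rw [go_nil, go_nil]; split <;> simp
    | cons c rest =>
      by_cases hc : c = '\r'
      · subst hc
        cases rest with
        | nil => exact step (pvNe_singleton _) _ _ rfl
        | cons c2 w =>
          by_cases h2 : c2 = '\n'
          · subst h2
            rw [go_crlf, go_crlf]
            simp only [List.length_cons] at hu
            rw [ih w [] (cur.reverse :: acc) (by omega), ih w [] [cur.reverse] (by omega)]
            simp
          · exact step (pvNe_of_ne_nl _ h2) _ _ rfl
      · exact step (pvNe_of_ne_cr _ hc) _ _ rfl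

theorem go_head : ∀ (n : Nat) (u cur : List Char), u.length ≤ n → (cur ≠ [] ∨ u ≠ []) →
    ∃ r, PySem.Chars.splitlines.go pvBr u cur [] =
      (cur.reverse ++ u.takeWhile (fun c => !pvBr c)) :: r := by
  intro n
  induction n with
  | zero =>
    intro u cur hu hor
    have : u = [] := List.eq_nil_of_length_eq_zero (Nat.le_zero.mp hu)
    subst this
    have hcur : cur ≠ [] := hor.resolve_right (by simp)
    refine ⟨[], ?_⟩
    rw [go_nil]
    simp [List.isEmpty_iff, hcur]
  | succ n ih =>
    intro u cur hu hor
    have step : (∀ w, u ≠ '\r'::'\n'::w) → ∀ (c : Char) (rest : List Char), u = c :: rest →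
        ∃ r, PySem.Chars.splitlines.go pvBr u cur [] =
          (cur.reverse ++ u.takeWhile (fun c => !pvBr c)) :: r := by
      intro hne c rest hco
      subst hco
      rw [go_cons _ _ _ _ _ hne]
      simp only [List.length_cons] at hu
      by_cases hb : pvBr c
      · rw [hb]
        rw [go_acc n rest [] [cur.reverse] (by omega)]
        refine ⟨PySem.Chars.splitlines.go pvBr rest [] [], ?_⟩
        simp [hb]
      · rw [Bool.not_eq_true] at hb
        rw [hb]
        obtain ⟨r, hr⟩ := ih rest (c :: cur) (by omega) (Or.inl (by simp))
        refine ⟨r, ?_⟩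
        rw [hr]
        simp [hb]
    cases u with
    | nil =>
      have hcur : cur ≠ [] := hor.resolve_right (by simp)
      refine ⟨[], ?_⟩
      rw [go_nil]
      simp [List.isEmpty_iff, hcur]
    | cons c rest =>
      by_cases hc : c = '\r'
      · subst hc
        cases rest with
        | nil => exact step (pvNe_singleton _) _ _ rfl
        | cons c2 w =>
          by_cases h2 : c2 = '\n'
          · subst h2
            rw [go_crlf]
            simp only [List.length_cons] at hu
            rw [go_acc n w [] [cur.reverse] (by omega)]
            refine ⟨PySem.Chars.splitlines.go pvBr w [] [], ?_⟩
            simp [pvBr]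
          · exact step (pvNe_of_ne_nl _ h2) _ _ rfl
      · exact step (pvNe_of_ne_cr _ hc) _ _ rfl

-- every line boundary is whitespace
theorem pvBr_isspace {c : Char} (h : pvBr c = true) : PySem.Chars.isspace c = true := by
  simp [pvBr] at h
  simp [PySem.Chars.isspace]
  omega

theorem splitlines_eq_go (u : List Char) :
    PySem.Chars.splitlines u = PySem.Chars.splitlines.go pvBr u [] [] := rfl

theorem splitlines_head (u : List Char) (hu : u ≠ []) :
    ∃ r, PySem.Chars.splitlines u = (u.takeWhile (fun c => !pvBr c)) :: r := by
  rw [splitlines_eq_go]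
  exact go_head u.length u [] le_rfl (Or.inr hu)

def pvFp : List Char → List Char
  | [] => []
  | c :: rest => if (['\n','\n'] : List Char).isPrefixOf (c::rest) then [] else c :: pvFp rest

theorem splitOn_go_head : ∀ (fuel : Nat) (l cur : List Char) (acc), l.length < fuel →
    ∃ r, PySem.Chars.splitOn.go ['\n','\n'] fuel l cur acc =
      acc.reverse ++ (cur.reverse ++ pvFp l) :: r := by
  intro fuel
  induction fuel with
  | zero => intro l cur acc h; omega
  | succ fuel ih =>
    intro l cur acc h
    cases l with
    | nil =>
      refine ⟨[], ?_⟩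
      rw [PySem.Chars.splitOn.go.eq_def]
      simp [pvFp]
    | cons c rest =>
      rw [PySem.Chars.splitOn.go.eq_def]
      simp only [List.length_cons] at h
      by_cases hp : (['\n','\n'] : List Char).isPrefixOf (c :: rest)
      · simp only [hp, if_pos]
        obtain ⟨r, hr⟩ := ih (List.drop 2 (c :: rest)) [] (cur.reverse :: acc) (by simp; omega)
        refine ⟨(pvFp (List.drop 2 (c :: rest))) :: r, ?_⟩
        rw [show List.drop (['\n','\n'] : List Char).length (c :: rest) = List.drop 2 (c :: rest) from rfl, hr]
        simp [pvFp, hp]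
      · simp only [hp, Bool.false_eq_true, if_false]
        obtain ⟨r, hr⟩ := ih rest (c :: cur) acc (by omega)
        refine ⟨r, ?_⟩
        rw [hr]
        simp [pvFp, hp]

theorem splitOn_head (s : List Char) :
    ∃ r, PySem.Chars.splitOn s ['\n','\n'] = pvFp s :: r := by
  have h := splitOn_go_head (s.length + 1) s [] [] (by omega)
  simpa [PySem.Chars.splitOn] using h

theorem tw_fp (l : List Char) :
    (pvFp l).takeWhile (fun c => !pvBr c) = l.takeWhile (fun c => !pvBr c) := by
  induction l with
  | nil => rfl
  | cons c rest ih =>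
    by_cases hp : (['\n','\n'] : List Char).isPrefixOf (c :: rest)
    · have hc : c = '\n' := by
        rw [List.isPrefixOf_iff_prefix] at hp
        obtain ⟨t, ht⟩ := hp
        injection ht with e1 _
        exact e1.symm
      subst hc
      simp [pvFp, hp, pvBr]
    · simp only [pvFp, hp, Bool.false_eq_true, if_false]
      by_cases hb : pvBr c
      · simp [hb]
      · simp [hb, ih]


theorem strip_eq_nil_iff (z : List Char) :
    PySem.Chars.strip z = [] ↔ ∀ c ∈ z, PySem.Chars.isspace c = true := by
  simp only [PySem.Chars.strip, PySem.Chars.rstrip, PySem.Chars.lstrip,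
    List.reverse_eq_nil_iff, List.dropWhile_eq_nil_iff, List.mem_reverse]
  constructor
  · intro h c hc
    rcases List.mem_append.mp ((List.takeWhile_append_dropWhile (p := PySem.Chars.isspace) (l := z)) ▸ hc) with h1 | h2
    · exact List.mem_takeWhile_imp h1
    · exact h c h2
  · intro h c hc
    exact h c (List.dropWhile_subset _ hc)

theorem rstrip_prefix (y : List Char) : PySem.Chars.rstrip y <+: y := by
  obtain ⟨t, ht⟩ := List.dropWhile_suffix (l := y.reverse) (p := PySem.Chars.isspace)
  refine ⟨t.reverse, ?_⟩
  simp only [PySem.Chars.rstrip]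
  rw [← List.reverse_append, ht, List.reverse_reverse]

theorem strip_head_not_space (z : List Char) (h : PySem.Chars.strip z ≠ []) :
    PySem.Chars.isspace ((PySem.Chars.strip z).head h) = false := by
  obtain ⟨t, ht⟩ := rstrip_prefix (PySem.Chars.lstrip z)
  have hl : PySem.Chars.lstrip z ≠ [] := by
    intro hnil
    apply h
    have : PySem.Chars.strip z <+: ([] : List Char) := hnil ▸ rstrip_prefix _
    simpa using this
  have h1 : (PySem.Chars.lstrip z).head? = some ((PySem.Chars.strip z).head h) := by
    have e := List.head?_append_of_ne_nil (PySem.Chars.strip z) (l₂ := t) h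
    simp only [PySem.Chars.strip] at e
    rw [ht] at e
    rw [e]
    exact List.head?_eq_some_head h
  have h2 : (PySem.Chars.lstrip z).head hl = (PySem.Chars.strip z).head h := by
    have := List.head?_eq_some_head hl
    rw [h1] at this
    exact (Option.some.injEq _ _ ▸ this).symm ▸ rfl
  rw [← h2]
  simp only [PySem.Chars.lstrip] at hl ⊢
  exact List.head_dropWhile_not _ hl

theorem rstrip_decomp (y : List Char) :
    ∃ tail, y = PySem.Chars.rstrip y ++ tail ∧ ∀ c ∈ tail, PySem.Chars.isspace c = true := by
  refine ⟨(List.takeWhile PySem.Chars.isspace y.reverse).reverse, ?_, ?_⟩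
  · simp only [PySem.Chars.rstrip]
    rw [← List.reverse_append, List.takeWhile_append_dropWhile, List.reverse_reverse]
  · intro c hc
    exact List.mem_takeWhile_imp (List.mem_reverse.mp hc)

theorem rstrip_append_sp (w v : List Char) (hv : ∀ c ∈ v, PySem.Chars.isspace c = true) :
    PySem.Chars.rstrip (w ++ v) = PySem.Chars.rstrip w := by
  simp only [PySem.Chars.rstrip, List.reverse_append]
  rw [List.dropWhile_append]
  simp only [List.isEmpty_iff, List.dropWhile_eq_nil_iff, List.mem_reverse]
  rw [if_pos (fun c hc => hv c hc)]

theorem strip_append_sp (u v : List Char) (hv : ∀ c ∈ v, PySem.Chars.isspace c = true) :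
    PySem.Chars.strip (u ++ v) = PySem.Chars.strip u := by
  simp only [PySem.Chars.strip, PySem.Chars.lstrip]
  rw [List.dropWhile_append]
  by_cases hu : (List.dropWhile PySem.Chars.isspace u).isEmpty
  · rw [if_pos hu]
    rw [List.isEmpty_iff] at hu
    rw [hu]
    rw [List.dropWhile_eq_nil_iff.mpr (fun c hc => hv c hc)]
  · rw [if_neg hu]
    exact rstrip_append_sp _ _ hv

-- B stripped before taking the first line does not change the stripped first line
theorem strip_tw_strip (y : List Char) (hy : y ≠ [])
    (hh : PySem.Chars.isspace (y.head hy) = false) :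
    PySem.Chars.strip ((PySem.Chars.strip y).takeWhile (fun c => !pvBr c)) =
      PySem.Chars.strip (y.takeWhile (fun c => !pvBr c)) := by
  have hsr : PySem.Chars.strip y = PySem.Chars.rstrip y := by
    cases y with
    | nil => simp at hy
    | cons c w =>
      simp only [List.head_cons] at hh
      have hdw : List.dropWhile PySem.Chars.isspace (c :: w) = c :: w :=
        List.dropWhile_cons_of_neg (by simp [hh])
      simp only [PySem.Chars.strip, PySem.Chars.lstrip, hdw]
  obtain ⟨tail, hdec, htail⟩ := rstrip_decomp y
  have hty : y.takeWhile (fun c => !pvBr c) =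
      ((PySem.Chars.rstrip y ++ tail).takeWhile (fun c => !pvBr c)) := by rw [← hdec]
  rw [hty, List.takeWhile_append]
  by_cases hlen : ((PySem.Chars.rstrip y).takeWhile (fun c => !pvBr c)).length = (PySem.Chars.rstrip y).length
  · rw [if_pos hlen]
    have htw : (PySem.Chars.rstrip y).takeWhile (fun c => !pvBr c) = PySem.Chars.rstrip y :=
      (List.takeWhile_prefix _).eq_of_length hlen
    rw [hsr, htw]
    rw [strip_append_sp _ _ (fun c hc => htail c ((List.takeWhile_prefix _).subset hc))]
  · rw [if_neg hlen, hsr]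

-- a line starting with a non-space character has a non-empty strip
theorem tw_strip_ne (z : List Char) (hz : z ≠ [])
    (hh : PySem.Chars.isspace (z.head hz) = false) :
    PySem.Chars.strip (z.takeWhile (fun c => !pvBr c)) ≠ [] := by
  cases z with
  | nil => simp at hz
  | cons c w =>
    simp only [List.head_cons] at hh
    have hbc : pvBr c = false := by
      cases hb : pvBr c
      · rfl
      · exact absurd (pvBr_isspace hb) (by simp [hh])
    rw [List.takeWhile_cons_of_pos (by simp [hbc])]
    intro hnil
    have := (strip_eq_nil_iff _).mp hnil c List.mem_cons_self
    simp [hh] at this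

-- ===== VERDICT (by name: the statement is the Claim_ definition above) =====
theorem postprocess_ltl_output_py_spec : Claim_equal_postprocess_ltl_output_py := by
  intro text _
  unfold Spec_postprocess_ltl_output_py postprocess_ltl_output_py postprocess_ltl_output_py_alt
  by_cases hemp : (PySem.Chars.strip text.toList).isEmpty
  · simp only [hemp, if_true]
  · simp only [hemp, Bool.false_eq_true, if_false]
    set s := PySem.Chars.strip text.toList with hs
    have hsne : s ≠ [] := by
      intro h0; rw [h0] at hemp; exact hemp rfl
    have hh : PySem.Chars.isspace (s.head hsne) = false := strip_head_not_space text.toList hsne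
    obtain ⟨c, w, hcw⟩ : ∃ c w, s = c :: w := by
      cases hc2 : s with
      | nil => exact absurd hc2 hsne
      | cons c w => exact ⟨c, w, rfl⟩
    have hhead : s.head hsne = c := by
      have h2 : s.head? = some c := by rw [hcw]; rfl
      have h1 := List.head?_eq_some_head hsne
      rw [h1] at h2
      injection h2
    have hhc : PySem.Chars.isspace c = false := hhead ▸ hh
    -- B side
    obtain ⟨rB, hB⟩ := splitlines_head s hsne
    have hBne := tw_strip_ne s hsne hh
    rw [hB]
    rw [show pvAltLoop ((s.takeWhile fun c => !pvBr c) :: rB) s =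
        PySem.Chars.strip (s.takeWhile fun c => !pvBr c) from by
      simp [pvAltLoop, List.isEmpty_iff, hBne]]
    -- A side: first block
    obtain ⟨rA, hA⟩ := splitOn_head s
    have hpf : pvFp s = c :: pvFp w := by
      rw [hcw]
      have hnp : (['\n','\n'] : List Char).isPrefixOf (c :: w) = false := by
        cases hb : (['\n','\n'] : List Char).isPrefixOf (c :: w)
        · rfl
        · exfalso
          rw [List.isPrefixOf_iff_prefix] at hb
          obtain ⟨t, ht⟩ := hb
          injection ht with e1 _
          rw [← e1] at hhc
          simp [PySem.Chars.isspace] at hhc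
      simp [pvFp, hnp]
    have hfne : pvFp s ≠ [] := by rw [hpf]; simp
    have hfh : PySem.Chars.isspace ((pvFp s).head hfne) = false := by
      have : (pvFp s).head hfne = c := by
        have := hpf
        revert hfne
        rw [hpf]
        intro _; rfl
      rw [this]; exact hhc
    have hbne : PySem.Chars.strip (pvFp s) ≠ [] := by
      intro hnil
      have := (strip_eq_nil_iff _).mp hnil c (by rw [hpf]; exact List.mem_cons_self)
      simp [hhc] at this
    rw [hA]
    simp only [List.map_cons, List.filter_cons,
      show (!(PySem.Chars.strip (pvFp s)).isEmpty) = true from by simpa [List.isEmpty_iff] using hbne,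
      if_true]
    -- A side: first line of the first block
    have hs2ne : PySem.Chars.strip (pvFp s) ≠ [] := hbne
    have hs2h := strip_head_not_space (pvFp s) hs2ne
    obtain ⟨rL, hL⟩ := splitlines_head _ hs2ne
    have hLne := tw_strip_ne _ hs2ne hs2h
    rw [hL]
    simp only [List.map_cons, List.filter_cons,
      show (!(PySem.Chars.strip ((PySem.Chars.strip (pvFp s)).takeWhile fun c => !pvBr c)).isEmpty) = true from by
        simpa [List.isEmpty_iff] using hLne,
      if_true]
    -- the chain: strip(first line(strip(first block))) = strip(first line of s)
    refine congrArg String.ofList ?_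
    rw [strip_tw_strip (pvFp s) hfne hfh]
    exact congrArg PySem.Chars.strip (tw_fp s)
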